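-- pv_equiv track=rewrite | github.com/TapioPulkkinen/Thesis-GenAI-in-Construction-Conflict-Detection | Testing_software/KG-test/main.py | prune_messages
-- ===== SOURCE A (Python) =====
-- def prune_messages(messages):
--     # Determine the indices to keep
--     keep_indices = set()
--     seen_user = seen_assistant = False
--
--     for i in reversed(range(len(messages))):
--         role = messages[i]['role']
--         if role == 'system':
--             keep_indices.add(i)
--         elif role == 'user' and not seen_user:
--             keep_indices.add(i)
--             seen_user = True
--         elif role == 'assistant' and not seen_assistant:
--             keep_indices.add(i)
--             seen_assistant = True
--
--     new_messages = [messages[i] for i in sorted(keep_indices)]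
--
--     return new_messages
-- ===== SOURCE B (Python) =====
-- def prune_messages(messages):
--     # Forward pass: locate the last user and last assistant messages by index,
--     # then keep system messages plus those two in one forward filter.
--     last_user = last_assistant = -1
--     for i in range(len(messages)):
--         role = messages[i]['role']
--         if role == 'user':
--             last_user = i
--         elif role == 'assistant':
--             last_assistant = i
--     return [messages[i] for i in range(len(messages))
--             if messages[i]['role'] == 'system' or i == last_user or i == last_assistant]
-- ===== Notes on version B (the rewrite author's own statement) =====
-- stated objective: simpler
-- what changed: A's reverse scan maintaining a keep-index set plus seen_user/seen_assistant flags followed by sorted() is replaced by a forward scan that records the last user and last assistant indices and a single forward filter over the indices, eliminating the set, the flags and the sort.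
import Mathlib
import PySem

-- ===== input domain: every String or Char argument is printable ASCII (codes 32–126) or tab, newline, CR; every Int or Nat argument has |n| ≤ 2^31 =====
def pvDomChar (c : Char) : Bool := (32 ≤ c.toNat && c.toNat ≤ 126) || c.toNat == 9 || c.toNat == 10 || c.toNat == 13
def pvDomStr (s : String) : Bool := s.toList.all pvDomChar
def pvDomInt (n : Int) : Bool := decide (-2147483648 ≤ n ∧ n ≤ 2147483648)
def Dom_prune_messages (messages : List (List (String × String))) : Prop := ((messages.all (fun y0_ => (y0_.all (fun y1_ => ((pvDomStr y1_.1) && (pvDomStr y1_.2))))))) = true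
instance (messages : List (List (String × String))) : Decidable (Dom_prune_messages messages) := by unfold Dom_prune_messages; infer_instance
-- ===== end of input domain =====

-- B replaces A's reverse scan with a keep-set, two seen flags and a sorted() call by a forward
-- pass computing the last user/assistant indices followed by a single forward filter (simpler).

-- msg['role'] : first value bound to key "role" in the association list ('' placeholder; Pre_ excludes missing keys, where Python raises KeyError)
def pvRole (m : List (String × String)) : String :=
  ((m.find? (fun p => p.1 == "role")).map Prod.snd).getD ""

-- ===== PORT A =====
-- loop body of A's reverse scan: keep set, seen_user, seen_assistant
def pvStepA (messages : List (List (String × String)))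
    (st : PySem.Set Int × Bool × Bool) (i : Int) : PySem.Set Int × Bool × Bool :=
  let role := pvRole (PySem.List.pyGetD messages i [])
  if role == "system" then (PySem.Set.add st.1 i, st.2.1, st.2.2)
  else if role == "user" && !st.2.1 then (PySem.Set.add st.1 i, true, st.2.2)
  else if role == "assistant" && !st.2.2 then (PySem.Set.add st.1 i, st.2.1, true)
  else st

def prune_messages (messages : List (List (String × String))) : List (List (String × String)) :=
  let st := ((PySem.List.pyRange 0 (messages.length : Int) 1).reverse).foldl
    (pvStepA messages) (PySem.Set.empty, false, false)
  (PySem.List.sorted st.1 (fun x => x) false).map (fun i => PySem.List.pyGetD messages i [])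

-- ===== PORT B =====
-- loop body of B's forward scan: (last_user, last_assistant)
def pvStepB (messages : List (List (String × String))) (p : Int × Int) (i : Int) : Int × Int :=
  let role := pvRole (PySem.List.pyGetD messages i [])
  if role == "user" then (i, p.2)
  else if role == "assistant" then (p.1, i)
  else p

def prune_messages_alt (messages : List (List (String × String))) : List (List (String × String)) :=
  let p := (PySem.List.pyRange 0 (messages.length : Int) 1).foldl (pvStepB messages) (-1, -1)
  ((PySem.List.pyRange 0 (messages.length : Int) 1).filter
      (fun i => pvRole (PySem.List.pyGetD messages i []) == "system" || i == p.1 || i == p.2)).map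
    (fun i => PySem.List.pyGetD messages i [])

-- ===== PRECONDITION & SPEC =====
-- Pre_ excludes exactly the inputs where a message has no "role" key: there Python A (and B) raises KeyError.
def Pre_prune_messages (messages : List (List (String × String))) : Prop :=
  ∀ m ∈ messages, (m.any (fun p => p.1 == "role")) = true
instance (messages : List (List (String × String))) : Decidable (Pre_prune_messages messages) := by
  unfold Pre_prune_messages; infer_instance
def pvWitness_prune_messages : (List (List (String × String))) :=
  [[("role", "system")], [("role", "user")], [("role", "assistant")], [("role", "user")]]

def Spec_prune_messages (messages : List (List (String × String))) (out : List (List (String × String))) : Prop := out = prune_messages_alt messages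
instance (messages : List (List (String × String))) (out : List (List (String × String))) : Decidable (Spec_prune_messages messages out) := by unfold Spec_prune_messages; infer_instance

-- ===== CLAIM (what is proved, stated in full; the proofs are below) =====
def Claim_equal_prune_messages : Prop := ∀ (messages : List (List (String × String))), Dom_prune_messages messages → Pre_prune_messages messages → Spec_prune_messages messages (prune_messages messages)

-- ===== LEMMAS AND PROOFS =====

-- role of the k-th message (k a valid Nat index)
def pvRoleAt (ms : List (List (String × String))) (k : Nat) : String :=
  pvRole (ms.getD k [])

theorem pvRoleAt_cast (ms : List (List (String × String))) (k : Nat) :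
    pvRole (PySem.List.pyGetD ms ((k : Nat) : Int) []) = pvRoleAt ms k := by
  simp [pvRoleAt, PySem.List.pyGetD_natCast]

-- the simp-normal form of a Nat-indexed role lookup folds back to pvRoleAt
theorem pvRoleAt_getElem (ms : List (List (String × String))) (k : Nat) :
    pvRole (ms[k]?.getD []) = pvRoleAt ms k := by
  simp [pvRoleAt, List.getD_eq_getElem?_getD]

-- is there a message with the given role at an index < j ?
def pvHas (ms : List (List (String × String))) (r : String) (j : Nat) : Bool :=
  (List.range j).any (fun k => pvRoleAt ms k == r)

-- is there a message with the given role at an index k with i < k < j ?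
def pvHasAbove (ms : List (List (String × String))) (r : String) (i : Int) (j : Nat) : Bool :=
  (List.range j).any (fun k => decide (i < (k : Int)) && (pvRoleAt ms k == r))

-- which indices A's reverse scan keeps, given flags (su, sa) on entry and suffix start j
def pvKeep (ms : List (List (String × String))) (su sa : Bool) (j : Nat) (i : Int) : Bool :=
  (pvRole (PySem.List.pyGetD ms i []) == "system")
  || (!(su || pvHasAbove ms "user" i j) && (pvRole (PySem.List.pyGetD ms i []) == "user"))
  || (!(sa || pvHasAbove ms "assistant" i j) && (pvRole (PySem.List.pyGetD ms i []) == "assistant"))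

-- B's (last_user, last_assistant) after scanning the first n messages
def pvPair (ms : List (List (String × String))) : Nat → Int × Int
  | 0 => (-1, -1)
  | n+1 => pvStepB ms (pvPair ms n) (n : Int)

theorem pvHas_succ (ms : List (List (String × String))) (r : String) (j : Nat) :
    pvHas ms r (j+1) = (pvHas ms r j || (pvRoleAt ms j == r)) := by
  simp [pvHas, List.range_succ]

theorem pvHasAbove_succ (ms : List (List (String × String))) (r : String) (i : Int) (j : Nat) :
    pvHasAbove ms r i (j+1)
      = (pvHasAbove ms r i j || (decide (i < (j : Int)) && (pvRoleAt ms j == r))) := by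
  simp [pvHasAbove, List.range_succ]

theorem pvHasAbove_self (ms : List (List (String × String))) (r : String) (j : Nat) :
    pvHasAbove ms r ((j : Nat) : Int) j = false := by
  simp only [pvHasAbove, List.any_eq_false]
  intro k hk
  simp at hk ⊢
  intro h
  omega

theorem loopA_inv (ms : List (List (String × String))) :
    ∀ (j : Nat) (S : List Int) (su sa : Bool), (∀ x ∈ S, (j : Int) ≤ x) →
    ((PySem.List.pyRange 0 (j : Int) 1).reverse).foldl (pvStepA ms) (S, su, sa)
      = (S ++ ((PySem.List.pyRange 0 (j : Int) 1).reverse).filter (pvKeep ms su sa j),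
         su || pvHas ms "user" j, sa || pvHas ms "assistant" j) := by
  intro j
  induction j with
  | zero =>
    intro S su sa _
    simp [PySem.List.pyRange_one_eq_nil, pvHas]
  | succ j ih =>
    intro S su sa hS
    have hc : ((j+1 : Nat) : Int) = (j : Int) + 1 := by push_cast; ring
    have hS' : ∀ x ∈ S, (j : Int) ≤ x := by
      intro x hx; have := hS x hx; push_cast at this ⊢; omega
    have hnot : ((j : Nat) : Int) ∉ S := by
      intro h; have := hS _ h; push_cast at this; omega
    have hmem : ∀ x ∈ (PySem.List.pyRange 0 (j:Int) 1).reverse, 0 ≤ x ∧ x < (j:Int) := by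
      intro x hx
      rw [List.mem_reverse] at hx
      exact PySem.List.mem_pyRange_one.mp hx
    rw [hc, PySem.List.pyRange_one_succ_right (by positivity), List.reverse_append]
    simp only [List.reverse_cons, List.reverse_nil, List.nil_append, List.singleton_append,
      List.foldl_cons, List.filter_cons]
    by_cases hsys : pvRoleAt ms j = "system"
    · have hstep : pvStepA ms (S, su, sa) ((j:Nat):Int) = (S ++ [((j:Nat):Int)], su, sa) := by
        simp [pvStepA, pvRoleAt_cast, pvRoleAt_getElem, hsys, PySem.Set.add_of_not_mem hnot]
      have hhead : pvKeep ms su sa (j+1) ((j:Nat):Int) = true := by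
        simp [pvKeep, pvRoleAt_cast, pvRoleAt_getElem, hsys]
      have hfc : List.filter (pvKeep ms su sa j) ((PySem.List.pyRange 0 (j:Int) 1).reverse)
          = List.filter (pvKeep ms su sa (j+1)) ((PySem.List.pyRange 0 (j:Int) 1).reverse) := by
        refine List.filter_congr ?_
        intro x hx
        obtain ⟨h0, h1⟩ := hmem x hx
        simp [pvKeep, pvHasAbove_succ, hsys, h1]
      rw [hstep, ih (S ++ [((j:Nat):Int)]) su sa (by
        intro x hx
        rcases List.mem_append.mp hx with h | h
        · exact hS' x h
        · simp at h; omega)]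
      simp [hhead, ← hfc, pvHas_succ, hsys, List.append_assoc]
    · by_cases hu : pvRoleAt ms j = "user"
      · cases su with
        | false =>
          have hstep : pvStepA ms (S, false, sa) ((j:Nat):Int) = (S ++ [((j:Nat):Int)], true, sa) := by
            simp [pvStepA, pvRoleAt_cast, pvRoleAt_getElem, hu, PySem.Set.add_of_not_mem hnot]
          have hhead : pvKeep ms false sa (j+1) ((j:Nat):Int) = true := by
            simp [pvKeep, pvRoleAt_cast, pvRoleAt_getElem, pvHasAbove_succ, pvHasAbove_self, hu]
          have hfc : List.filter (pvKeep ms true sa j) ((PySem.List.pyRange 0 (j:Int) 1).reverse)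
              = List.filter (pvKeep ms false sa (j+1)) ((PySem.List.pyRange 0 (j:Int) 1).reverse) := by
            refine List.filter_congr ?_
            intro x hx
            obtain ⟨h0, h1⟩ := hmem x hx
            simp [pvKeep, pvHasAbove_succ, hu, h1]
          rw [hstep, ih (S ++ [((j:Nat):Int)]) true sa (by
            intro x hx
            rcases List.mem_append.mp hx with h | h
            · exact hS' x h
            · simp at h; omega)]
          simp [hhead, ← hfc, pvHas_succ, hu, List.append_assoc]
        | true =>
          have hstep : pvStepA ms (S, true, sa) ((j:Nat):Int) = (S, true, sa) := by
            simp [pvStepA, pvRoleAt_cast, pvRoleAt_getElem, beq_iff_eq, hu, hsys]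
          have hhead : pvKeep ms true sa (j+1) ((j:Nat):Int) = false := by
            simp [pvKeep, pvRoleAt_cast, pvRoleAt_getElem, beq_iff_eq, hu, hsys]
          have hfc : List.filter (pvKeep ms true sa j) ((PySem.List.pyRange 0 (j:Int) 1).reverse)
              = List.filter (pvKeep ms true sa (j+1)) ((PySem.List.pyRange 0 (j:Int) 1).reverse) := by
            refine List.filter_congr ?_
            intro x hx
            obtain ⟨h0, h1⟩ := hmem x hx
            simp [pvKeep, pvHasAbove_succ, hu, h1]
          rw [hstep, ih S true sa hS']
          simp [hhead, ← hfc, pvHas_succ, hu]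
      · by_cases ha : pvRoleAt ms j = "assistant"
        · cases sa with
          | false =>
            have hstep : pvStepA ms (S, su, false) ((j:Nat):Int) = (S ++ [((j:Nat):Int)], su, true) := by
              simp [pvStepA, pvRoleAt_cast, pvRoleAt_getElem, beq_iff_eq, ha, hsys, hu,
                PySem.Set.add_of_not_mem hnot]
            have hhead : pvKeep ms su false (j+1) ((j:Nat):Int) = true := by
              simp [pvKeep, pvRoleAt_cast, pvRoleAt_getElem, pvHasAbove_succ, pvHasAbove_self,
                beq_iff_eq, ha, hsys, hu]
            have hfc : List.filter (pvKeep ms su true j) ((PySem.List.pyRange 0 (j:Int) 1).reverse)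
                = List.filter (pvKeep ms su false (j+1)) ((PySem.List.pyRange 0 (j:Int) 1).reverse) := by
              refine List.filter_congr ?_
              intro x hx
              obtain ⟨h0, h1⟩ := hmem x hx
              simp [pvKeep, pvHasAbove_succ, beq_iff_eq, ha, hsys, hu, h1]
            rw [hstep, ih (S ++ [((j:Nat):Int)]) su true (by
              intro x hx
              rcases List.mem_append.mp hx with h | h
              · exact hS' x h
              · simp at h; omega)]
            simp [hhead, ← hfc, pvHas_succ, beq_iff_eq, ha, hsys, hu, List.append_assoc]
          | true =>
            have hstep : pvStepA ms (S, su, true) ((j:Nat):Int) = (S, su, true) := by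
              simp [pvStepA, pvRoleAt_cast, pvRoleAt_getElem, beq_iff_eq, ha, hsys, hu]
            have hhead : pvKeep ms su true (j+1) ((j:Nat):Int) = false := by
              simp [pvKeep, pvRoleAt_cast, pvRoleAt_getElem, beq_iff_eq, ha, hsys, hu]
            have hfc : List.filter (pvKeep ms su true j) ((PySem.List.pyRange 0 (j:Int) 1).reverse)
                = List.filter (pvKeep ms su true (j+1)) ((PySem.List.pyRange 0 (j:Int) 1).reverse) := by
              refine List.filter_congr ?_
              intro x hx
              obtain ⟨h0, h1⟩ := hmem x hx
              simp [pvKeep, pvHasAbove_succ, beq_iff_eq, ha, hsys, hu, h1]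
            rw [hstep, ih S su true hS']
            simp [hhead, ← hfc, pvHas_succ, beq_iff_eq, ha, hsys, hu]
        · have hu' : (pvRoleAt ms j == "user") = false := by simp [hu]
          have ha' : (pvRoleAt ms j == "assistant") = false := by simp [ha]
          have hstep : pvStepA ms (S, su, sa) ((j:Nat):Int) = (S, su, sa) := by
            simp [pvStepA, pvRoleAt_cast, pvRoleAt_getElem, beq_iff_eq, ha, hsys, hu]
          have hhead : pvKeep ms su sa (j+1) ((j:Nat):Int) = false := by
            simp [pvKeep, pvRoleAt_cast, pvRoleAt_getElem, beq_iff_eq, ha, hsys, hu]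
          have hfc : List.filter (pvKeep ms su sa j) ((PySem.List.pyRange 0 (j:Int) 1).reverse)
              = List.filter (pvKeep ms su sa (j+1)) ((PySem.List.pyRange 0 (j:Int) 1).reverse) := by
            refine List.filter_congr ?_
            intro x hx
            obtain ⟨h0, h1⟩ := hmem x hx
            simp [pvKeep, pvHasAbove_succ, hu', ha', h1]
          rw [hstep, ih S su sa hS']
          simp [hhead, ← hfc, pvHas_succ, hu', ha']

theorem foldB_eq_pvPair (ms : List (List (String × String))) (n : Nat) :
    (PySem.List.pyRange 0 (n : Int) 1).foldl (pvStepB ms) (-1, -1) = pvPair ms n := by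
  induction n with
  | zero => simp [PySem.List.pyRange_one_eq_nil, pvPair]
  | succ n ih =>
    have h : ((n+1 : Nat) : Int) = (n : Int) + 1 := by push_cast; ring
    rw [h, PySem.List.pyRange_one_succ_right (by positivity), List.foldl_append, ih]
    simp [pvPair]

theorem pvPair_fst_spec (ms : List (List (String × String))) (n : Nat) :
    ((pvPair ms n).1 = -1 ∧ ∀ k < n, pvRoleAt ms k ≠ "user")
    ∨ (∃ k, k < n ∧ (pvPair ms n).1 = (k : Int) ∧ pvRoleAt ms k = "user"
        ∧ ∀ m, k < m → m < n → pvRoleAt ms m ≠ "user") := by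
  induction n with
  | zero => exact Or.inl ⟨rfl, by omega⟩
  | succ n ih =>
    simp only [pvPair]
    by_cases hu : pvRoleAt ms n = "user"
    · refine Or.inr ⟨n, by omega, ?_, hu, by omega⟩
      simp [pvStepB, pvRoleAt_cast, pvRoleAt_getElem, hu]
    · have hfst : (pvStepB ms (pvPair ms n) (n : Int)).1 = (pvPair ms n).1 := by
        simp only [pvStepB, pvRoleAt_cast]
        split <;> simp_all <;> split <;> simp
      rw [hfst]
      rcases ih with ⟨h1, h2⟩ | ⟨k, hk, he, hr, hm⟩
      · refine Or.inl ⟨h1, fun k hk => ?_⟩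
        rcases Nat.lt_succ_iff_lt_or_eq.mp hk with h | h
        · exact h2 k h
        · subst h; exact hu
      · refine Or.inr ⟨k, by omega, he, hr, fun m h1 h2 => ?_⟩
        rcases Nat.lt_succ_iff_lt_or_eq.mp h2 with h | h
        · exact hm m h1 h
        · subst h; exact hu

theorem pvPair_snd_spec (ms : List (List (String × String))) (n : Nat) :
    ((pvPair ms n).2 = -1 ∧ ∀ k < n, pvRoleAt ms k ≠ "assistant")
    ∨ (∃ k, k < n ∧ (pvPair ms n).2 = (k : Int) ∧ pvRoleAt ms k = "assistant"
        ∧ ∀ m, k < m → m < n → pvRoleAt ms m ≠ "assistant") := by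
  induction n with
  | zero => exact Or.inl ⟨rfl, by omega⟩
  | succ n ih =>
    simp only [pvPair]
    by_cases ha : pvRoleAt ms n = "assistant"
    · refine Or.inr ⟨n, by omega, ?_, ha, by omega⟩
      simp [pvStepB, pvRoleAt_cast, pvRoleAt_getElem, ha]
    · have hsnd : (pvStepB ms (pvPair ms n) (n : Int)).2 = (pvPair ms n).2 := by
        simp only [pvStepB, pvRoleAt_cast]
        split <;> simp_all <;> split <;> simp_all
      rw [hsnd]
      rcases ih with ⟨h1, h2⟩ | ⟨k, hk, he, hr, hm⟩
      · refine Or.inl ⟨h1, fun k hk => ?_⟩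
        rcases Nat.lt_succ_iff_lt_or_eq.mp hk with h | h
        · exact h2 k h
        · subst h; exact ha
      · refine Or.inr ⟨k, by omega, he, hr, fun m h1 h2 => ?_⟩
        rcases Nat.lt_succ_iff_lt_or_eq.mp h2 with h | h
        · exact hm m h1 h
        · subst h; exact ha

theorem pvHasAbove_eq_true_iff (ms : List (List (String × String))) (r : String) (i : Int) (j : Nat) :
    pvHasAbove ms r i j = true ↔ ∃ k, k < j ∧ i < (k : Int) ∧ pvRoleAt ms k = r := by
  simp [pvHasAbove]

theorem lu_eq (ms : List (List (String × String))) (n k : Nat) (hk : k < n) :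
    (((k : Nat) : Int) == (pvPair ms n).1)
      = (!pvHasAbove ms "user" ((k : Nat) : Int) n && (pvRoleAt ms k == "user")) := by
  rcases pvPair_fst_spec ms n with ⟨h1, h2⟩ | ⟨m, hm, he, hr, hmax⟩
  · rw [h1]
    have hne : (pvRoleAt ms k == "user") = false := by
      rw [beq_eq_false_iff_ne]; exact h2 k hk
    have hki : ((((k : Nat) : Int)) == (-1 : Int)) = false := by
      rw [beq_eq_false_iff_ne]; omega
    rw [hne, hki, Bool.and_false]
  · rw [he]
    by_cases hkm : k = m
    · subst hkm
      have hna : pvHasAbove ms "user" ((k : Nat) : Int) n = false := by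
        rw [Bool.eq_false_iff]
        intro htrue
        obtain ⟨k', hk', hlt, hr'⟩ := (pvHasAbove_eq_true_iff ms "user" _ n).mp htrue
        exact hmax k' (by omega) hk' hr'
      simp [hna, hr]
    · have hne : (((k : Nat) : Int) == ((m : Nat) : Int)) = false := by
        rw [beq_eq_false_iff_ne]; intro h; exact hkm (by omega)
      rw [hne]
      by_cases hru : pvRoleAt ms k = "user"
      · have hha : pvHasAbove ms "user" ((k : Nat) : Int) n = true := by
          rw [pvHasAbove_eq_true_iff]
          rcases Nat.lt_or_ge k m with h | h
          · exact ⟨m, hm, by omega, hr⟩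
          · exact absurd hru (hmax k (by omega) hk)
        rw [hha]
        simp
      · have hru' : (pvRoleAt ms k == "user") = false := by
          rw [beq_eq_false_iff_ne]; exact hru
        rw [hru', Bool.and_false]

theorem la_eq (ms : List (List (String × String))) (n k : Nat) (hk : k < n) :
    (((k : Nat) : Int) == (pvPair ms n).2)
      = (!pvHasAbove ms "assistant" ((k : Nat) : Int) n && (pvRoleAt ms k == "assistant")) := by
  rcases pvPair_snd_spec ms n with ⟨h1, h2⟩ | ⟨m, hm, he, hr, hmax⟩
  · rw [h1]
    have hne : (pvRoleAt ms k == "assistant") = false := by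
      rw [beq_eq_false_iff_ne]; exact h2 k hk
    have hki : ((((k : Nat) : Int)) == (-1 : Int)) = false := by
      rw [beq_eq_false_iff_ne]; omega
    rw [hne, hki, Bool.and_false]
  · rw [he]
    by_cases hkm : k = m
    · subst hkm
      have hna : pvHasAbove ms "assistant" ((k : Nat) : Int) n = false := by
        rw [Bool.eq_false_iff]
        intro htrue
        obtain ⟨k', hk', hlt, hr'⟩ := (pvHasAbove_eq_true_iff ms "assistant" _ n).mp htrue
        exact hmax k' (by omega) hk' hr'
      simp [hna, hr]
    · have hne : (((k : Nat) : Int) == ((m : Nat) : Int)) = false := by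
        rw [beq_eq_false_iff_ne]; intro h; exact hkm (by omega)
      rw [hne]
      by_cases hru : pvRoleAt ms k = "assistant"
      · have hha : pvHasAbove ms "assistant" ((k : Nat) : Int) n = true := by
          rw [pvHasAbove_eq_true_iff]
          rcases Nat.lt_or_ge k m with h | h
          · exact ⟨m, hm, by omega, hr⟩
          · exact absurd hru (hmax k (by omega) hk)
        rw [hha]
        simp
      · have hru' : (pvRoleAt ms k == "assistant") = false := by
          rw [beq_eq_false_iff_ne]; exact hru
        rw [hru', Bool.and_false]

-- ===== VERDICT (by name: the statement is the Claim_ definition above) =====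
theorem prune_messages_spec : Claim_equal_prune_messages := by
  intro ms _ _
  unfold Spec_prune_messages
  simp only [prune_messages, prune_messages_alt]
  rw [foldB_eq_pvPair]
  rw [loopA_inv ms ms.length PySem.Set.empty false false
    (by intro x hx; simp [PySem.Set.empty] at hx)]
  have hrev : ((PySem.List.pyRange 0 (ms.length : Int) 1).reverse).filter
        (pvKeep ms false false ms.length)
      = ((PySem.List.pyRange 0 (ms.length : Int) 1).filter
        (pvKeep ms false false ms.length)).reverse := List.filter_reverse ..
  have hpw : (((PySem.List.pyRange 0 (ms.length : Int) 1).filter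
      (pvKeep ms false false ms.length)).Pairwise (· < ·)) :=
    (PySem.List.pairwise_lt_pyRange_one 0 ((ms.length : Nat) : Int)).filter _
  have hsort : PySem.List.sorted
      (((PySem.List.pyRange 0 (ms.length : Int) 1).reverse).filter
        (pvKeep ms false false ms.length)) (fun x => x) false
      = (PySem.List.pyRange 0 (ms.length : Int) 1).filter (pvKeep ms false false ms.length) := by
    rw [hrev]
    apply PySem.List.sorted_eq_of_perm_of_pairwise_lt
    case hp => exact (List.reverse_perm _).symm
    case hs => exact hpw
  have hfil : (PySem.List.pyRange 0 (ms.length : Int) 1).filter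
        (fun i => pvRole (PySem.List.pyGetD ms i []) == "system"
          || i == (pvPair ms ms.length).1 || i == (pvPair ms ms.length).2)
      = (PySem.List.pyRange 0 (ms.length : Int) 1).filter (pvKeep ms false false ms.length) := by
    refine List.filter_congr ?_
    intro x hx
    obtain ⟨h0, h1⟩ := PySem.List.mem_pyRange_one.mp hx
    have hx' : x = ((x.toNat : Nat) : Int) := by omega
    rw [hx']
    have hk : x.toNat < ms.length := by omega
    rw [lu_eq ms ms.length x.toNat hk, la_eq ms ms.length x.toNat hk]
    have hrole : pvRole (PySem.List.pyGetD ms ((x.toNat : Nat) : Int) []) = pvRoleAt ms x.toNat :=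
      pvRoleAt_cast ms x.toNat
    simp only [pvKeep, hrole, Bool.false_or]
  simp only [PySem.Set.empty, List.nil_append]
  rw [hsort, hfil]
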